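-- pv_equiv track=rewrite | github.com/Jacob-Greenberg/ground-station | pass_prediction/satellite_predictor.py | convert_360_pairs_to_450
-- ===== SOURCE A (Python) =====
-- def convert_360_pairs_to_450(pairs: list) -> list:
--     """Allows the predictor to use the full 450 degrees of the rotator.
--
--     Our azimuth rotator is able to spin 450 degrees the additional
--     90 degrees gives the rotator some wiggle room for passes which
--     overshoot the limit.
--
--     The predictor has no way of knowing this however so this function
--     turns sequences that would ordinarily overshoot in a 360 degree
--     system to 450 degrees. It's worth pointing out that this doesn't
--     totally prevent overshooting
--     """
--     for index, pair in enumerate(pairs):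
--         az = pair[0]
--         increase_index = 0
--
--         if index > 0 and az < 10 and pairs[index - 1][0] > 350:
--             while (
--                 index + increase_index < len(pairs)
--                 and pairs[index + increase_index][0] <= 90
--             ):
--                 new_az = pairs[index + increase_index][0] + 360
--                 if new_az > 450:  # sanity check
--                     break
--                 pairs[index + increase_index][0] = new_az
--                 increase_index = increase_index + 1
--
--         index = increase_index + index
--     return pairs
-- ===== SOURCE B (Python) =====
-- def convert_360_pairs_to_450(pairs: list) -> list:
--     """Single forward pass with a 'converting' flag instead of A's nested
--     rescan-while; mutates the inner lists in place like A."""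
--     converting = False
--     for i, pair in enumerate(pairs):
--         az = pair[0]
--         if converting and az <= 90:
--             pair[0] = az + 360
--         elif i > 0 and az < 10 and pairs[i - 1][0] > 350:
--             converting = True
--             pair[0] = az + 360
--         else:
--             converting = False
--     return pairs
-- ===== Notes on version B (the rewrite author's own statement) =====
-- stated objective: simpler
-- what changed: A's nested rescan (trigger scan plus an inner while that converts a whole run and is then re-walked by the outer loop) is replaced by one forward pass carrying a 'converting' flag that adds 360 to each run element as it is reached.
-- outside the precondition, e.g. on convert_360_pairs_to_450([[355], [5], [-355]]): A returns [[355], [365], [365]], B returns [[355], [365], [5]]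
import Mathlib
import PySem

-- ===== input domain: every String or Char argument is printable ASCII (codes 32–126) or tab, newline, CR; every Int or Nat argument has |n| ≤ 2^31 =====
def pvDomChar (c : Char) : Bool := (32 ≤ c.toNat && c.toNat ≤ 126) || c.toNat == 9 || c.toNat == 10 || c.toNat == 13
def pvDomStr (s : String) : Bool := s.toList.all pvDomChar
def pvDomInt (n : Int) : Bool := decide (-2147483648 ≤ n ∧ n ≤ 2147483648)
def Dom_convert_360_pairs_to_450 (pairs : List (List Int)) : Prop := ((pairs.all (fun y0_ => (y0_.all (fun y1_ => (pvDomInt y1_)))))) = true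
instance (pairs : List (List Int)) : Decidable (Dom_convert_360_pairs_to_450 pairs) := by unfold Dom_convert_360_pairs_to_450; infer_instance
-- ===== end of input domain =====

-- B replaces A's nested rescan-while with one forward pass carrying a 'converting'
-- flag (objective: simpler). Both Pythons mutate the inner lists in place; the
-- equivalence proved here is about the RETURN value.

-- ===== PORT A =====
-- pairs[i][0], read with a default; Python raises IndexError on an empty inner
-- list, which Pre_ excludes (all indices used are nonnegative and in range there).
def pvVal (ps : List (List Int)) (i : Nat) : Int := (ps.getD i []).headD 0

-- A's inner while over position j = index + increase_index; the fuel argument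
-- only bounds the iteration count (callers pass ps.length - j, which suffices
-- since j increases by 1 each step and the length never changes)
def stepWhileA : Nat → List (List Int) → Nat → List (List Int)
  | 0, ps, _ => ps
  | fuel + 1, ps, j =>
    if j < ps.length then
      if pvVal ps j ≤ 90 then
        if pvVal ps j + 360 > 450 then ps  -- sanity check (new_az = pvVal ps j + 360)
        else stepWhileA fuel (ps.set j ((ps.getD j []).set 0 (pvVal ps j + 360))) (j + 1)
      else ps
    else ps

-- A's outer for-loop over index (fuel = ps.length - i, same remark)
def outerA : Nat → List (List Int) → Nat → List (List Int)
  | 0, ps, _ => ps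
  | fuel + 1, ps, i =>
    if i < ps.length then
      if 0 < i ∧ pvVal ps i < 10 ∧ pvVal ps (i - 1) > 350 then
        outerA fuel (stepWhileA (ps.length - i) ps i) (i + 1)
      else outerA fuel ps (i + 1)
    else ps

def convert_360_pairs_to_450 (pairs : List (List Int)) : List (List Int) :=
  outerA pairs.length pairs 0

-- ===== PORT B =====
-- one forward pass; 'converting' records that the previous element was converted
def loopB : Nat → List (List Int) → Nat → Bool → List (List Int)
  | 0, ps, _, _ => ps
  | fuel + 1, ps, i, converting =>
    if i < ps.length then
      if converting ∧ pvVal ps i ≤ 90 then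
        loopB fuel (ps.set i ((ps.getD i []).set 0 (pvVal ps i + 360))) (i + 1) true
      else if 0 < i ∧ pvVal ps i < 10 ∧ pvVal ps (i - 1) > 350 then
        loopB fuel (ps.set i ((ps.getD i []).set 0 (pvVal ps i + 360))) (i + 1) true
      else loopB fuel ps (i + 1) false
    else ps

def convert_360_pairs_to_450_alt (pairs : List (List Int)) : List (List Int) :=
  loopB pairs.length pairs 0 false

-- ===== PRECONDITION & SPEC =====
-- Pre_ restricts to the function's natural domain: nonempty inner lists (Python
-- raises IndexError on pair[0] otherwise) with nonnegative azimuth values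
-- (azimuths are degrees; on negative entries A's forward rescan can re-trigger
-- and add 360 twice, behaviour outside the natural domain that B does not mimic).
def Pre_convert_360_pairs_to_450 (pairs : List (List Int)) : Prop :=
  ∀ l ∈ pairs, l ≠ [] ∧ 0 ≤ l.headD 0
instance (pairs : List (List Int)) : Decidable (Pre_convert_360_pairs_to_450 pairs) := by
  unfold Pre_convert_360_pairs_to_450; infer_instance

def pvWitness_convert_360_pairs_to_450 : List (List Int) := [[355], [5], [20], [100]]

def Spec_convert_360_pairs_to_450 (pairs : List (List Int)) (out : List (List Int)) : Prop := out = convert_360_pairs_to_450_alt pairs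
instance (pairs : List (List Int)) (out : List (List Int)) : Decidable (Spec_convert_360_pairs_to_450 pairs out) := by unfold Spec_convert_360_pairs_to_450; infer_instance

-- ===== CLAIM (what is proved, stated in full; the proofs are below) =====
def Claim_equal_convert_360_pairs_to_450 : Prop := ∀ (pairs : List (List Int)), Dom_convert_360_pairs_to_450 pairs → Pre_convert_360_pairs_to_450 pairs → Spec_convert_360_pairs_to_450 pairs (convert_360_pairs_to_450 pairs)

-- ===== LEMMAS AND PROOFS =====

-- invariant carried by the proof: inner lists nonempty with nonnegative head (= Pre_)
def pvInv (ps : List (List Int)) : Prop := ∀ l ∈ ps, l ≠ [] ∧ 0 ≤ l.headD 0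

theorem stepWhileA_length (fuel : Nat) : ∀ (ps : List (List Int)) (j : Nat),
    (stepWhileA fuel ps j).length = ps.length := by
  induction fuel with
  | zero => intro ps j; rfl
  | succ fuel ih =>
    intro ps j
    rw [stepWhileA]
    split_ifs <;> simp [ih, List.length_set]

theorem pvVal_set_ne (ps : List (List Int)) (j k : Nat) (x : List Int) (h : k ≠ j) :
    pvVal (ps.set j x) k = pvVal ps k := by
  simp [pvVal, List.getD, List.getElem?_set_ne (Ne.symm h)]

theorem pvVal_set_self (ps : List (List Int)) (j : Nat) (v : Int)
    (hj : j < ps.length) (hne : ps.getD j [] ≠ []) :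
    pvVal (ps.set j ((ps.getD j []).set 0 v)) j = v := by
  have h1 : ps.getD j [] = ps[j] := by simp [List.getD, List.getElem?_eq_getElem hj]
  cases h2 : ps[j] with
  | nil => exact absurd (h1.trans h2) hne
  | cons a t =>
    simp [pvVal, List.getD, List.getElem?_set_self hj, List.getElem?_eq_getElem hj, h2]

theorem pvInv_val (ps : List (List Int)) (i : Nat) (h : pvInv ps) : 0 ≤ pvVal ps i := by
  by_cases hi : i < ps.length
  · have : ps.getD i [] = ps[i] := by simp [List.getD, List.getElem?_eq_getElem hi]
    rw [pvVal, this]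
    exact (h _ (ps.getElem_mem hi)).2
  · simp [pvVal, List.getD, List.getElem?_eq_none (show ps.length ≤ i by omega)]

theorem pvInv_getD_ne (ps : List (List Int)) (i : Nat) (h : pvInv ps)
    (hi : i < ps.length) : ps.getD i [] ≠ [] := by
  have h1 : ps.getD i [] = ps[i] := by simp [List.getD, List.getElem?_eq_getElem hi]
  rw [h1]
  exact (h _ (ps.getElem_mem hi)).1

theorem pvInv_set (ps : List (List Int)) (j : Nat) (v : Int) (hv : 0 ≤ v)
    (hne : ps.getD j [] ≠ []) (h : pvInv ps) :
    pvInv (ps.set j ((ps.getD j []).set 0 v)) := by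
  intro l hl
  rcases List.mem_or_eq_of_mem_set hl with h1 | h1
  · exact h l h1
  · subst h1
    cases h2 : ps.getD j [] with
    | nil => exact absurd h2 hne
    | cons a t => simp [h2, hv]

theorem stepWhileA_val_lt (fuel : Nat) : ∀ (ps : List (List Int)) (j k : Nat), k < j →
    pvVal (stepWhileA fuel ps j) k = pvVal ps k := by
  induction fuel with
  | zero => intro ps j k _; rfl
  | succ fuel ih =>
    intro ps j k hk
    rw [stepWhileA]
    split_ifs with h1 h2 h3
    · rfl
    · rw [ih _ (j + 1) k (by omega)]
      exact pvVal_set_ne ps j k _ (by omega)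
    · rfl
    · rfl

-- main simultaneous induction on the fuel: A's outer loop = B's pass, for both
-- flag states; the 'true' conjunct takes any sufficient fuel for A's inner while
theorem pv_main (n : Nat) : ∀ (ps : List (List Int)) (i : Nat), ps.length ≤ i + n → pvInv ps →
    (outerA n ps i = loopB n ps i false) ∧
    (∀ m, ps.length ≤ i + m → outerA n (stepWhileA m ps i) i = loopB n ps i true) := by
  induction n with
  | zero =>
    intro ps i hn _
    refine ⟨rfl, fun m _ => ?_⟩
    have hi : ¬ i < ps.length := by omega
    cases m with
    | zero => rfl
    | succ m => rw [stepWhileA]; simp only [if_neg hi]; rfl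
  | succ n ihn =>
    intro ps i hn hinv
    by_cases hi : i < ps.length
    · have haz : 0 ≤ pvVal ps i := pvInv_val ps i hinv
      have hne : ps.getD i [] ≠ [] := pvInv_getD_ne ps i hinv hi
      have hinv1 : pvInv (ps.set i ((ps.getD i []).set 0 (pvVal ps i + 360))) :=
        pvInv_set ps i (pvVal ps i + 360) (by omega) hne hinv
      have hlen1 : (ps.set i ((ps.getD i []).set 0 (pvVal ps i + 360))).length
          = ps.length := by simp [List.length_set]
      constructor
      · -- false-flag: outerA = loopB … false
        rw [outerA, loopB]
        simp only [if_pos hi, Bool.false_eq_true, false_and, if_false]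
        by_cases htr : 0 < i ∧ pvVal ps i < 10 ∧ pvVal ps (i - 1) > 350
        · rw [if_pos htr, if_pos htr]
          -- A converts the run at once, B converts element i and raises the flag
          have hm : ps.length - i = (ps.length - i - 1) + 1 := by omega
          rw [hm, stepWhileA]
          simp only [if_pos hi, if_pos (show pvVal ps i ≤ 90 by omega),
            if_neg (show ¬ pvVal ps i + 360 > 450 by omega)]
          exact (ihn _ (i + 1) (by omega) hinv1).2 _ (by omega)
        · rw [if_neg htr, if_neg htr]
          exact (ihn ps (i + 1) (by omega) hinv).1
      · -- true-flag: outerA on the run already converted by A = loopB … true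
        intro m hm
        have hm1 : m = (m - 1) + 1 := by omega
        rw [loopB]
        simp only [if_pos hi, true_and]
        by_cases h90 : pvVal ps i ≤ 90
        · rw [if_pos h90, hm1, stepWhileA]
          simp only [if_pos hi, if_pos h90,
            if_neg (show ¬ pvVal ps i + 360 > 450 by omega)]
          -- A's outer loop revisits index i on the converted list and skips it
          rw [outerA]
          have hival : pvVal (stepWhileA (m - 1)
              (ps.set i ((ps.getD i []).set 0 (pvVal ps i + 360))) (i + 1)) i
              = pvVal ps i + 360 := by
            rw [stepWhileA_val_lt _ _ _ _ (by omega)]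
            exact pvVal_set_self ps i _ hi hne
          rw [if_pos (show i < (stepWhileA (m - 1) _ (i + 1)).length by
            rw [stepWhileA_length, hlen1]; exact hi)]
          rw [if_neg (by rw [hival]; omega)]
          exact (ihn _ (i + 1) (by omega) hinv1).2 (m - 1) (by omega)
        · rw [if_neg h90,
            if_neg (show ¬ (0 < i ∧ pvVal ps i < 10 ∧ pvVal ps (i - 1) > 350) by omega),
            hm1, stepWhileA]
          simp only [if_pos hi, if_neg h90]
          rw [outerA]
          rw [if_pos hi,
            if_neg (show ¬ (0 < i ∧ pvVal ps i < 10 ∧ pvVal ps (i - 1) > 350) by omega)]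
          exact (ihn ps (i + 1) (by omega) hinv).1
    · refine ⟨?_, fun m _ => ?_⟩
      · rw [outerA, loopB]; simp only [if_neg hi]
      · have hsw : stepWhileA m ps i = ps := by
          cases m with
          | zero => rfl
          | succ m => rw [stepWhileA]; simp only [if_neg hi]
        rw [hsw, outerA, loopB]; simp only [if_neg hi]

-- ===== VERDICT (by name: the statement is the Claim_ definition above) =====
theorem convert_360_pairs_to_450_spec : Claim_equal_convert_360_pairs_to_450 := by
  intro pairs _ hpre
  unfold Spec_convert_360_pairs_to_450 convert_360_pairs_to_450 convert_360_pairs_to_450_alt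
  exact (pv_main pairs.length pairs 0 (by omega) hpre).1
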